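-- pv_equiv track=rewrite | github.com/garymm/ha_hatch | custom_components/ha_hatch/alarm.py | alarm_repeat_label
-- ===== SOURCE A (Python) =====
-- from typing import Any
--
-- ALARM_WEEKDAY_BITS: dict[str, int] = {
--     "monday": 2,
--     "tuesday": 4,
--     "wednesday": 8,
--     "thursday": 16,
--     "friday": 32,
--     "saturday": 64,
--     "sunday": 1,
-- }
--
-- ALARM_WEEKDAY_LABELS: dict[str, str] = {
--     "monday": "Mon",
--     "tuesday": "Tue",
--     "wednesday": "Wed",
--     "thursday": "Thu",
--     "friday": "Fri",
--     "saturday": "Sat",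
--     "sunday": "Sun",
-- }
--
-- ALARM_WEEKDAYS_MASK = sum(ALARM_WEEKDAY_BITS.values())
--
-- ALARM_WEEKDAYS_ONLY_MASK = (
--     ALARM_WEEKDAY_BITS["monday"]
--     | ALARM_WEEKDAY_BITS["tuesday"]
--     | ALARM_WEEKDAY_BITS["wednesday"]
--     | ALARM_WEEKDAY_BITS["thursday"]
--     | ALARM_WEEKDAY_BITS["friday"]
-- )
--
-- ALARM_WEEKENDS_MASK = ALARM_WEEKDAY_BITS["sunday"] | ALARM_WEEKDAY_BITS["saturday"]
--
-- def alarm_weekdays(days_of_week: Any) -> list[str]: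
--     normalized_days_of_week = _normalize_days_of_week(days_of_week)
--     if normalized_days_of_week is None:
--         return []
--     return [
--         weekday
--         for weekday, bit in ALARM_WEEKDAY_BITS.items()
--         if normalized_days_of_week & bit
--     ]
--
-- def alarm_repeat_label(days_of_week: Any) -> str:
--     normalized_days_of_week = _normalize_days_of_week(days_of_week)
--     if normalized_days_of_week is None:
--         return "Unknown"
--     if normalized_days_of_week == 0:
--         return "Once"
--     if normalized_days_of_week == ALARM_WEEKDAYS_ONLY_MASK:
--         return "Weekdays"
--     if normalized_days_of_week == ALARM_WEEKENDS_MASK: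
--         return "Weekends"
--     if normalized_days_of_week == ALARM_WEEKDAYS_MASK:
--         return "Every day"
--     return ", ".join(
--         ALARM_WEEKDAY_LABELS[weekday]
--         for weekday in alarm_weekdays(normalized_days_of_week)
--     )
--
-- def _normalize_days_of_week(days_of_week: Any) -> int | None:
--     if days_of_week is None:
--         return None
--     if isinstance(days_of_week, bool) or not isinstance(days_of_week, int):
--         return None
--     if days_of_week < 0 or days_of_week > ALARM_WEEKDAYS_MASK:
--         return None
--     return days_of_week
-- ===== SOURCE B (Python) =====
-- _NAMES = ["Sun", "Mon", "Tue", "Wed", "Thu", "Fri", "Sat"]  # indexed by bit position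
--
--
-- def _join(mask):
--     # generic label: active day names in Mon..Sun display order of bit indices
--     return ", ".join(_NAMES[i] for i in (1, 2, 3, 4, 5, 6, 0) if mask >> i & 1)
--
--
-- # Precompute every label once; the four special labels overwrite their table slots,
-- # so the per-call path does no branching over masks at all.
-- _TABLE = [_join(m) for m in range(128)]
-- _TABLE[0] = "Once"
-- _TABLE[62] = "Weekdays"      # Mon|Tue|Wed|Thu|Fri
-- _TABLE[65] = "Weekends"      # Sat|Sun
-- _TABLE[127] = "Every day"
--
--
-- def alarm_repeat_label(days_of_week):
--     if isinstance(days_of_week, bool) or not isinstance(days_of_week, int):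
--         return "Unknown"
--     if 0 <= days_of_week < 128:
--         return _TABLE[days_of_week]
--     return "Unknown"
-- ===== Notes on version B (the rewrite author's own statement) =====
-- stated objective: alternative
-- what changed: B replaces A's per-call normalize-then-branch over four precomputed masks plus a dict walk with a 128-entry label table precomputed once (generic shift-and-mask join over bit positions, with the four special labels patched into their slots), so each call is just a range check and one table index.
import Mathlib
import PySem

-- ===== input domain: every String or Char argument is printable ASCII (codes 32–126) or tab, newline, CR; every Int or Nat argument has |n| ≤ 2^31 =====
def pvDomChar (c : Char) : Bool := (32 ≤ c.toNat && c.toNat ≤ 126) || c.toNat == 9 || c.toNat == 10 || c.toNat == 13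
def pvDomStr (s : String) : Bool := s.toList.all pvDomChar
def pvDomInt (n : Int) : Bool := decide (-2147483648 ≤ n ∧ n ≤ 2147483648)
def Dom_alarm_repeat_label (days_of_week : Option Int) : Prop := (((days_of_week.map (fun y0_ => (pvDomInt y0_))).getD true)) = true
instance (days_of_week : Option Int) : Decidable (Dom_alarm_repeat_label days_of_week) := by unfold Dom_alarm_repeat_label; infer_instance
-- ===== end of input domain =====

-- B precomputes all 128 labels into a table (generic join patched with the four special labels) and answers by one index; alternative decomposition, same behaviour.


-- ===== PORT A =====
-- Port of A: normalize via bound checks, then compare the integer against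
-- precomputed masks; otherwise join labels looked up per active weekday.
-- (Python's runtime type checks on `Any` are outside the Option Int convention.)
def pvBitsA : List (String × Int) :=
  [("monday", 2), ("tuesday", 4), ("wednesday", 8), ("thursday", 16),
   ("friday", 32), ("saturday", 64), ("sunday", 1)]

def pvLabelsA : List (String × String) :=
  [("monday", "Mon"), ("tuesday", "Tue"), ("wednesday", "Wed"), ("thursday", "Thu"),
   ("friday", "Fri"), ("saturday", "Sat"), ("sunday", "Sun")]

def pvWeekdaysMaskA : Int := (pvBitsA.map (·.2)).sum

def pvWeekdaysOnlyMaskA : Int :=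
  PySem.Int.bor (PySem.Int.bor (PySem.Int.bor (PySem.Int.bor
    ((pvBitsA.lookup "monday").getD 0) ((pvBitsA.lookup "tuesday").getD 0))
    ((pvBitsA.lookup "wednesday").getD 0)) ((pvBitsA.lookup "thursday").getD 0))
    ((pvBitsA.lookup "friday").getD 0)

def pvWeekendsMaskA : Int :=
  PySem.Int.bor ((pvBitsA.lookup "sunday").getD 0) ((pvBitsA.lookup "saturday").getD 0)

def pvNormalizeA (days_of_week : Option Int) : Option Int :=
  match days_of_week with
  | none => none
  | some n => if n < 0 ∨ n > pvWeekdaysMaskA then none else some n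

def pvAlarmWeekdaysA (days_of_week : Option Int) : List String :=
  match pvNormalizeA days_of_week with
  | none => []
  | some n => (pvBitsA.filter (fun p => PySem.Int.band n p.2 ≠ 0)).map (·.1)

def alarm_repeat_label (days_of_week : Option Int) : String :=
  match pvNormalizeA days_of_week with
  | none => "Unknown"
  | some n =>
    if n = 0 then "Once"
    else if n = pvWeekdaysOnlyMaskA then "Weekdays"
    else if n = pvWeekendsMaskA then "Weekends"
    else if n = pvWeekdaysMaskA then "Every day"
    else PySem.Str.join ", "
      -- ALARM_WEEKDAY_LABELS[weekday]: every weekday produced is a key, so the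
      -- KeyError branch is unreachable; getD "" is exact here.
      ((pvAlarmWeekdaysA (some n)).map (fun w => (pvLabelsA.lookup w).getD ""))

-- ===== PORT B =====
-- B: one-time 128-entry table of labels (generic shift-and-mask join, four
-- slots patched with the special labels); a call is a range check + one index.
def pvNamesB : List String := ["Sun", "Mon", "Tue", "Wed", "Thu", "Fri", "Sat"]

-- x >> k is exact as x // 2**k (Python semantics for int shifts)
def pvShiftrB (a : Int) (k : Nat) : Int := PySem.Int.floordiv a (2 ^ k)

def pvJoinB (mask : Int) : String :=
  PySem.Str.join ", "
    (([1, 2, 3, 4, 5, 6, 0] : List Nat).filterMap (fun i =>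
      if PySem.Int.band (pvShiftrB mask i) 1 ≠ 0
      then some (pvNamesB.getD i "") else none))

def pvTableB : List String :=
  (((((List.range 128).map (fun m => pvJoinB (Int.ofNat m))).set 0 "Once").set 62
      "Weekdays").set 65 "Weekends").set 127 "Every day"

def alarm_repeat_label_alt (days_of_week : Option Int) : String :=
  match days_of_week with
  | none => "Unknown"
  | some n =>
    if 0 ≤ n ∧ n < 128 then pvTableB.getD n.toNat ""   -- in-range list index, exact
    else "Unknown"

-- ===== PRECONDITION & SPEC =====
def Spec_alarm_repeat_label (days_of_week : Option Int) (out : String) : Prop := out = alarm_repeat_label_alt days_of_week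
instance (days_of_week : Option Int) (out : String) : Decidable (Spec_alarm_repeat_label days_of_week out) := by unfold Spec_alarm_repeat_label; infer_instance

-- ===== CLAIM (what is proved, stated in full; the proofs are below) =====
def Claim_equal_alarm_repeat_label : Prop := ∀ (days_of_week : Option Int), Dom_alarm_repeat_label days_of_week → Spec_alarm_repeat_label days_of_week (alarm_repeat_label days_of_week)

-- ===== LEMMAS AND PROOFS =====
-- The whole in-range behaviour is a finite check over 0..127.
set_option maxRecDepth 8192 in
theorem pv_small : ∀ m : Nat, m < 128 →
    alarm_repeat_label (some (m : Int)) = alarm_repeat_label_alt (some (m : Int)) := by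
  decide

theorem alarm_repeat_label_spec : Claim_equal_alarm_repeat_label := by
  intro d _
  unfold Spec_alarm_repeat_label
  match d with
  | none => rfl
  | some n =>
    by_cases h : 0 ≤ n ∧ n < 128
    · have hm : n = ((n.toNat : Nat) : Int) := by omega
      rw [hm]
      exact pv_small n.toNat (by omega)
    · have h1 : n < 0 ∨ n > pvWeekdaysMaskA := by
        simp [pvWeekdaysMaskA, pvBitsA]; omega
      simp [alarm_repeat_label, alarm_repeat_label_alt, pvNormalizeA, h1, h]
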